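-- pv_equiv track=rewrite | github.com/Matteo-Candi/Master-Thesis | results/test_01/test_01_formatted.py | isOddLength
-- ===== SOURCE A (Python) =====
-- def isOddLength(num):
--     count = 0
--     while num > 0:
--         num //= 10
--         count += 1
--     if count % 2 != 0:
--         return True
--     return False
-- ===== SOURCE B (Python) =====
-- def isOddLength(num):
--     return num > 0 and len(str(num)) % 2 == 1
-- ===== Notes on version B (the rewrite author's own statement) =====
-- stated objective: idiomatic
-- what changed: Replaces the divide-by-10 counting loop with the decimal string representation: digit count = len(str(num)), guarded by num > 0 (for non-positive input A's loop never runs and it returns False).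
import Mathlib
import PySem

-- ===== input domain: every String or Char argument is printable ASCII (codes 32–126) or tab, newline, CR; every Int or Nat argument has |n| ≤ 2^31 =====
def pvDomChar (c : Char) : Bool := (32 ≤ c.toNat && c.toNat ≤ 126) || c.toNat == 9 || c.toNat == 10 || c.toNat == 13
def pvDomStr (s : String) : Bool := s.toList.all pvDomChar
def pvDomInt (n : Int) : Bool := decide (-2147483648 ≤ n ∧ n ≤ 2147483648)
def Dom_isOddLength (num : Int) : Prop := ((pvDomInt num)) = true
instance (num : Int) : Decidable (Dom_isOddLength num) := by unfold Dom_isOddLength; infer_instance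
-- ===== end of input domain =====

-- B replaces A's divide-by-10 counting loop by the length of the decimal string (the num > 0 guard
-- matches A, whose loop never runs for non-positive input); alternative formulation, not claimed faster.


-- ===== PORT A =====
-- the 'while num > 0: num //= 10; count += 1' loop, recursion on num.toNat
def isOddLengthLoop (num count : Int) : Int :=
  if h : num > 0 then
    isOddLengthLoop (PySem.Int.floordiv num 10) (count + 1)
  else count
termination_by num.toNat
decreasing_by
  have : PySem.Int.floordiv num 10 = num.fdiv 10 := rfl
  rw [this, Int.fdiv_eq_ediv]
  simp only [show (0:Int) ≤ 10 by norm_num, true_or, if_pos]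
  omega

def isOddLength (num : Int) : Bool :=
  if isOddLengthLoop num 0 % 2 ≠ 0 then true else false

-- ===== PORT B =====
def isOddLength_alt (num : Int) : Bool :=
  decide (num > 0) && decide (PySem.Str.len (PySem.Int.toStr num) % 2 = 1)

-- ===== PRECONDITION & SPEC =====
def Spec_isOddLength (num : Int) (out : Bool) : Prop := out = isOddLength_alt num
instance (num : Int) (out : Bool) : Decidable (Spec_isOddLength num out) := by unfold Spec_isOddLength; infer_instance

-- ===== CLAIM (what is proved, stated in full; the proofs are below) =====
def Claim_equal_isOddLength : Prop := ∀ (num : Int), Dom_isOddLength num → Spec_isOddLength num (isOddLength num)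

-- ===== LEMMAS AND PROOFS =====

-- the number of //=10 steps needed to drive a Nat to 0
def digitCount (n : Nat) : Nat :=
  if h : n = 0 then 0 else digitCount (n / 10) + 1
decreasing_by exact Nat.div_lt_self (Nat.pos_of_ne_zero h) (by norm_num)

lemma loop_eq_digitCount : ∀ (m : Nat) (c : Int),
    isOddLengthLoop (m : Int) c = c + (digitCount m : Int) := by
  intro m
  induction m using Nat.strong_induction_on with
  | _ m ih =>
    intro c
    rw [isOddLengthLoop]
    by_cases hm : m = 0
    · subst hm; simp [digitCount]
    · have hpos : (0:Int) < (m : Int) := by exact_mod_cast Nat.pos_of_ne_zero hm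
      rw [dif_pos hpos]
      have hfd : PySem.Int.floordiv (m : Int) 10 = ((m / 10 : Nat) : Int) := by
        show ((m : Int).fdiv 10) = _
        rw [Int.fdiv_eq_ediv]
        simp only [show (0:Int) ≤ 10 by norm_num, true_or, if_pos, sub_zero]
        exact_mod_cast (Int.natCast_div m 10).symm
      rw [hfd, ih (m / 10) (Nat.div_lt_self (Nat.pos_of_ne_zero hm) (by norm_num))]
      conv_rhs => rw [digitCount]
      rw [dif_neg hm]
      push_cast
      ring

lemma toDigitsCore_len : ∀ (f n : Nat), 0 < n → n < f →
    (Nat.toDigitsCore 10 f n []).length = digitCount n := by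
  intro f
  induction f with
  | zero => intro n h1 h2; omega
  | succ f ih =>
    intro n h1 h2
    rw [Nat.toDigitsCore]
    rw [digitCount, dif_neg (by omega)]
    by_cases hd : n / 10 = 0
    · simp [hd, digitCount]
    · rw [if_neg hd]
      rw [Nat.toDigitsCore_lens_eq]
      have hlt : n / 10 < f := by
        have := Nat.div_lt_self h1 (by norm_num : 1 < 10)
        omega
      rw [ih (n / 10) (Nat.pos_of_ne_zero hd) hlt]

lemma toDigits_len (n : Nat) (h : 0 < n) :
    (Nat.toDigits 10 n).length = digitCount n := by
  rw [Nat.toDigits]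
  exact toDigitsCore_len (n + 1) n h (by omega)

-- ===== VERDICT (by name: the statement is the Claim_ definition above) =====
theorem isOddLength_spec : Claim_equal_isOddLength := by
  intro num _
  unfold Spec_isOddLength isOddLength isOddLength_alt
  by_cases hpos : num > 0
  · have hnn : (0:Int) ≤ num := le_of_lt hpos
    have hcast : ((num.toNat : Nat) : Int) = num := Int.toNat_of_nonneg hnn
    have hloop : isOddLengthLoop num 0 = (digitCount num.toNat : Int) := by
      calc isOddLengthLoop num 0 = isOddLengthLoop ((num.toNat : Nat) : Int) 0 := by rw [hcast]
        _ = 0 + (digitCount num.toNat : Int) := loop_eq_digitCount num.toNat 0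
        _ = (digitCount num.toNat : Int) := by ring
    have hlen : PySem.Str.len (PySem.Int.toStr num) = (digitCount num.toNat : Int) := by
      unfold PySem.Str.len
      rw [PySem.Int.toList_toStr]
      unfold PySem.Int.toChars
      rw [if_neg (by omega : ¬ num < 0)]
      rw [toDigits_len num.toNat (by omega)]
    rw [hloop, hlen]
    rcases Int.emod_two_eq_zero_or_one (digitCount num.toNat : Int) with h2 | h2 <;>
      simp [h2, hpos]
  · have hz : isOddLengthLoop num 0 = 0 := by
      rw [isOddLengthLoop, dif_neg hpos]
    simp [hz, hpos]
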